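-- pv_equiv track=rewrite | github.com/Cassidy777/Compressed_a11y | Compressed_a11y/domain_detector.py | _score_libreoffice_writer
-- ===== SOURCE A (Python) =====
-- from typing import List, Dict, Any, Tuple
--
-- def _score_libreoffice_writer(nodes: List[Dict[str, Any]]) -> int:
--     """LibreOffice Writer (Word) のスコアリング"""
--     score = 0
--     has_styles_menu = False
--     has_table_menu = False # CalcにはなくWriterにあるTableメニュー
--
--     for n in nodes:
--         tag = (n.get("tag") or "").lower()
--         name = (n.get("name") or "").lower()
--         text = (n.get("text") or "").lower()
--
--         if "libreoffice writer" in name: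
--             score += 20
--
--         if tag == "menu":
--             if name == "styles":
--                 has_styles_menu = True
--                 score += 5
--             elif name == "table":
--                 # Calc の Table と混同しないよう注意だが、Writer の Table メニューは特徴的
--                 has_table_menu = True
--                 score += 3
--
--         if tag == "document-text": # Writerの本文エリア
--             score += 15
--
--     if has_styles_menu and has_table_menu:
--         score += 5
--
--     return score
--
--
--     OS_DOCK_APP_NAMES = {
--     "google chrome",
--     "thunderbird mail",
--     "visual studio code",
--     "vlc media player",
--     "libreoffice writer",
--     "libreoffice calc",
--     "libreoffice impress",
--     "gnu image manipulation program",
--     "files",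
--     "ubuntu software",
--     "help",
--     "terminal",
--     "trash",
--     "show applications",
-- }
-- ===== SOURCE B (Python) =====
-- from typing import List, Dict, Any
--
-- def _score_libreoffice_writer(nodes: List[Dict[str, Any]]) -> int:
--     """LibreOffice Writer scoring as a sum of independent aggregates."""
--     def tag(n):
--         return (n.get("tag") or "").lower()
--
--     def name(n):
--         return (n.get("name") or "").lower()
--
--     score = 20 * sum(1 for n in nodes if "libreoffice writer" in name(n))
--     score += 5 * sum(1 for n in nodes if tag(n) == "menu" and name(n) == "styles")
--     score += 3 * sum(1 for n in nodes if tag(n) == "menu" and name(n) == "table")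
--     score += 15 * sum(1 for n in nodes if tag(n) == "document-text")
--     if any(tag(n) == "menu" and name(n) == "styles" for n in nodes) and \
--        any(tag(n) == "menu" and name(n) == "table" for n in nodes):
--         score += 5
--     return score
-- ===== Notes on version B (the rewrite author's own statement) =====
-- stated objective: simpler
-- what changed: Replaces the single stateful loop carrying a running score and two boolean flags by independent counting passes (one count per scoring rule, weighted and summed) plus two any(...) scans for the styles+table bonus.
import Mathlib
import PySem

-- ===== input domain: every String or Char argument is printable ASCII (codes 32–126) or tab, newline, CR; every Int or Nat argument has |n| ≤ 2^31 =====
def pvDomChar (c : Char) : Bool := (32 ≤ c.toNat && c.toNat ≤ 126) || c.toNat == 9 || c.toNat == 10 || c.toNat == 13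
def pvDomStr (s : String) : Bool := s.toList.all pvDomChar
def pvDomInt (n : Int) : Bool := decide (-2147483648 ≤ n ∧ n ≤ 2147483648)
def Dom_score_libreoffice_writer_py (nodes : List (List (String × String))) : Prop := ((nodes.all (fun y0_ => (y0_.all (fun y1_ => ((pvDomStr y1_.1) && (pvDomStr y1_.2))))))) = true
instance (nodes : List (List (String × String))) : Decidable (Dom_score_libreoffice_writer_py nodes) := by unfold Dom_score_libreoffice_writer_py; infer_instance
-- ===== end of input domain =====

-- B replaces A's single stateful loop (running score + two flags) by independent
-- weighted counting passes and two any-scans; objective: simpler. Same cost.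

-- ===== PORT A =====
-- loop body of A, named so the proofs can speak about one step
def pvStepA (st : Int × Bool × Bool) (n : List (String × String)) : Int × Bool × Bool :=
  let score := st.1
  let hasStyles := st.2.1
  let hasTable := st.2.2
  let tag := PySem.Str.lower ((n.lookup "tag").getD "")
  let name := PySem.Str.lower ((n.lookup "name").getD "")
  let _text := PySem.Str.lower ((n.lookup "text").getD "")
  let score := if PySem.Str.isIn "libreoffice writer" name then score + 20 else score
  let st2 : Int × Bool × Bool :=
    if tag == "menu" then
      if name == "styles" then (score + 5, true, hasTable)
      else if name == "table" then (score + 3, hasStyles, true)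
      else (score, hasStyles, hasTable)
    else (score, hasStyles, hasTable)
  let score := if tag == "document-text" then st2.1 + 15 else st2.1
  (score, st2.2.1, st2.2.2)

def score_libreoffice_writer_py (nodes : List (List (String × String))) : Int :=
  let r := nodes.foldl pvStepA (0, false, false)
  if r.2.1 && r.2.2 then r.1 + 5 else r.1

-- ===== PORT B =====
def pvTagB (n : List (String × String)) : String := PySem.Str.lower ((n.lookup "tag").getD "")
def pvNameB (n : List (String × String)) : String := PySem.Str.lower ((n.lookup "name").getD "")

def score_libreoffice_writer_py_alt (nodes : List (List (String × String))) : Int :=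
  let score : Int := 20 * (nodes.countP (fun n => PySem.Str.isIn "libreoffice writer" (pvNameB n)) : Nat)
  let score := score + 5 * ((nodes.countP (fun n => pvTagB n == "menu" && pvNameB n == "styles") : Nat) : Int)
  let score := score + 3 * ((nodes.countP (fun n => pvTagB n == "menu" && pvNameB n == "table") : Nat) : Int)
  let score := score + 15 * ((nodes.countP (fun n => pvTagB n == "document-text") : Nat) : Int)
  if (nodes.any fun n => pvTagB n == "menu" && pvNameB n == "styles") &&
     (nodes.any fun n => pvTagB n == "menu" && pvNameB n == "table") then score + 5 else score

-- ===== PRECONDITION & SPEC =====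
def Spec_score_libreoffice_writer_py (nodes : List (List (String × String))) (out : Int) : Prop := out = score_libreoffice_writer_py_alt nodes
instance (nodes : List (List (String × String))) (out : Int) : Decidable (Spec_score_libreoffice_writer_py nodes out) := by unfold Spec_score_libreoffice_writer_py; infer_instance

-- ===== CLAIM (what is proved, stated in full; the proofs are below) =====
def Claim_equal_score_libreoffice_writer_py : Prop := ∀ (nodes : List (List (String × String))), Dom_score_libreoffice_writer_py nodes → Spec_score_libreoffice_writer_py nodes (score_libreoffice_writer_py nodes)

-- ===== LEMMAS AND PROOFS =====

-- loop invariant: A's fold from any start state adds the weighted counts and ORs the any-flags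
set_option maxHeartbeats 1000000 in
theorem pvLoopA_eq (l : List (List (String × String))) (s : Int) (st tb : Bool) :
    l.foldl pvStepA (s, st, tb) =
      (s + 20 * (l.countP (fun n => PySem.Str.isIn "libreoffice writer" (pvNameB n)) : Nat)
         + 5 * ((l.countP (fun n => pvTagB n == "menu" && pvNameB n == "styles") : Nat) : Int)
         + 3 * ((l.countP (fun n => pvTagB n == "menu" && pvNameB n == "table") : Nat) : Int)
         + 15 * ((l.countP (fun n => pvTagB n == "document-text") : Nat) : Int),
       st || (l.any fun n => pvTagB n == "menu" && pvNameB n == "styles"),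
       tb || (l.any fun n => pvTagB n == "menu" && pvNameB n == "table")) := by
  induction l generalizing s st tb with
  | nil => simp
  | cons n l ih =>
    simp only [List.foldl_cons, List.countP_cons, List.any_cons]
    rw [ih]
    simp only [pvStepA, pvTagB, pvNameB]
    by_cases hw : PySem.Str.isIn "libreoffice writer" (PySem.Str.lower ((n.lookup "name").getD "")) = true <;>
    by_cases hm : (PySem.Str.lower ((n.lookup "tag").getD "") == "menu") = true <;>
    by_cases hs : (PySem.Str.lower ((n.lookup "name").getD "") == "styles") = true <;>
    by_cases ht : (PySem.Str.lower ((n.lookup "name").getD "") == "table") = true <;>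
    by_cases hd : (PySem.Str.lower ((n.lookup "tag").getD "") == "document-text") = true <;>
      simp_all <;> push_cast <;> (try constructor) <;> (try constructor) <;>
      first
        | ring1
        | simp [beq_iff_eq, hm, hs, ht, hd, Bool.or_comm, Bool.or_left_comm]
        | simp [beq_eq_false_iff_ne.mpr hm]
        | simp [beq_eq_false_iff_ne.mpr hs]
        | simp [beq_eq_false_iff_ne.mpr ht]
        | (split_ifs with hg <;> (first | ring1 | exact absurd hg (by decide)))

-- ===== VERDICT (by name: the statement is the Claim_ definition above) =====
theorem score_libreoffice_writer_py_spec : Claim_equal_score_libreoffice_writer_py := by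
  intro nodes _
  unfold Spec_score_libreoffice_writer_py score_libreoffice_writer_py score_libreoffice_writer_py_alt
  rw [pvLoopA_eq]
  simp only [Bool.false_or]
  split <;> ring
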